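-- pv_equiv track=rewrite | github.com/prangel-git/number_theory | numbertheory/src/utilities.py | egyptian_to_numerator_denominator
-- ===== SOURCE A (Python) =====
-- def gcd_extended(a, b):
--
--     # Base Case
--     if a == 0:
--         return b, 0, 1
--
--     gcd, x1, y1 = gcd_extended(b % a, a)
--
--     # Update x and y using results of recursive
--     # call
--     x = y1 - (b // a) * x1
--     y = x1
--
--     return gcd, x, y
--
-- def gcd(a, b):
--     g, _, _ = gcd_extended(a, b)
--     return g
--
-- def simplify(numerator, denominator):
--     g = gcd(numerator, denominator)
--     numerator //= g
--     denominator //= g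
--     return numerator, denominator
--
-- def egyptian_to_numerator_denominator(egyptian_representation):
--     if not egyptian_representation:
--         return 0, 1
--
--     den0 = egyptian_representation[0]
--     num1, den1 = egyptian_to_numerator_denominator(egyptian_representation[1:])
--     numerator = den1 + den0 * num1
--     denominator = den0 * den1
--     return simplify(numerator, denominator)
-- ===== SOURCE B (Python) =====
-- def egyptian_to_numerator_denominator(egyptian_representation):
--     num, den = 0, 1
--     for d in reversed(egyptian_representation):
--         num, den = den + d * num, d * den
--         g, r = den, num
--         while r:
--             g, r = r, g % r
--         num //= g
--         den //= g
--     return num, den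
-- ===== Notes on version B (the rewrite author's own statement) =====
-- stated objective: simpler
-- what changed: Replaces the recursion-with-slicing and the recursive extended-gcd (Bezout coefficients computed and discarded) by a single accumulator loop over the reversed list with a plain two-variable iterative Euclid.
import Mathlib
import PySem

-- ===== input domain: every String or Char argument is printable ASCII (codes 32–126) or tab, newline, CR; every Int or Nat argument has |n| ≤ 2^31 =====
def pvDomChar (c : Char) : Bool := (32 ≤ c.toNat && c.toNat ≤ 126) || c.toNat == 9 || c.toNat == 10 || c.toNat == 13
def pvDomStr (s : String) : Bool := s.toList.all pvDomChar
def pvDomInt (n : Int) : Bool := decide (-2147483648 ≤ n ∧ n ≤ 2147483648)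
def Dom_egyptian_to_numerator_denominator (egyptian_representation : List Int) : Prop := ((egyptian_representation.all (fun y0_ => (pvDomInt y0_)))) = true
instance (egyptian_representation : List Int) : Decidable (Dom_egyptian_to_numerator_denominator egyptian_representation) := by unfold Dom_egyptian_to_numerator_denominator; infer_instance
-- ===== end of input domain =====

-- B replaces A's recursion-with-slicing and recursive extended gcd by an accumulator
-- loop over the reversed list with a plain iterative Euclid (objective: simpler).

-- termination measure for Python's floor-mod Euclid (used by both ports)
theorem pv_mod_natAbs_lt (b a : Int) (h : a ≠ 0) :
    (PySem.Int.mod b a).natAbs < a.natAbs := by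
  rcases lt_trichotomy a 0 with ha | ha | ha
  · have := PySem.Int.mod_neg_bounds (a := b) (b := a) ha
    omega
  · exact absurd ha h
  · have h1 := PySem.Int.mod_nonneg (a := b) (b := a) ha
    have h2 := PySem.Int.mod_lt (a := b) (b := a) ha
    omega

-- ===== PORT A =====
def pv_gcd_extended (a b : Int) : Int × Int × Int :=
  if h : a = 0 then (b, 0, 1)
  else
    let r := pv_gcd_extended (PySem.Int.mod b a) a
    (r.1, r.2.2 - (PySem.Int.floordiv b a) * r.2.1, r.2.1)
termination_by a.natAbs
decreasing_by exact pv_mod_natAbs_lt b a h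

def pv_gcd (a b : Int) : Int := (pv_gcd_extended a b).1

def pv_simplify (numerator denominator : Int) : Int × Int :=
  let g := pv_gcd numerator denominator
  (PySem.Int.floordiv numerator g, PySem.Int.floordiv denominator g)

def egyptian_to_numerator_denominator (egyptian_representation : List Int) : Int × Int :=
  match egyptian_representation with
  | [] => (0, 1)
  | den0 :: rest =>
    let p := egyptian_to_numerator_denominator rest
    pv_simplify (p.2 + den0 * p.1) (den0 * p.2)

-- ===== PORT B =====
-- 'while r: g, r = r, g % r'
def pv_gcd_loop (g r : Int) : Int :=
  if h : r = 0 then g else pv_gcd_loop r (PySem.Int.mod g r)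
termination_by r.natAbs
decreasing_by exact pv_mod_natAbs_lt g r h

-- one iteration of B's for-loop body on the state (num, den)
def pv_step (st : Int × Int) (d : Int) : Int × Int :=
  let num := st.2 + d * st.1
  let den := d * st.2
  let g := pv_gcd_loop den num
  (PySem.Int.floordiv num g, PySem.Int.floordiv den g)

def egyptian_to_numerator_denominator_alt (egyptian_representation : List Int) : Int × Int :=
  egyptian_representation.reverse.foldl pv_step (0, 1)

-- ===== PRECONDITION & SPEC =====
-- Pre_ excludes lists with two or more zero denominators, on which the Python A
-- (and B alike) raises ZeroDivisionError (gcd becomes 0).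
def Pre_egyptian_to_numerator_denominator (egyptian_representation : List Int) : Prop :=
  egyptian_representation.count 0 ≤ 1
instance (egyptian_representation : List Int) : Decidable (Pre_egyptian_to_numerator_denominator egyptian_representation) := by unfold Pre_egyptian_to_numerator_denominator; infer_instance

def pvWitness_egyptian_to_numerator_denominator : List Int := [2, 3, 7]

def Spec_egyptian_to_numerator_denominator (egyptian_representation : List Int) (out : Int × Int) : Prop := out = egyptian_to_numerator_denominator_alt egyptian_representation
instance (egyptian_representation : List Int) (out : Int × Int) : Decidable (Spec_egyptian_to_numerator_denominator egyptian_representation out) := by unfold Spec_egyptian_to_numerator_denominator; infer_instance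

-- ===== CLAIM (what is proved, stated in full; the proofs are below) =====
def Claim_equal_egyptian_to_numerator_denominator : Prop := ∀ (egyptian_representation : List Int), Dom_egyptian_to_numerator_denominator egyptian_representation → Pre_egyptian_to_numerator_denominator egyptian_representation → Spec_egyptian_to_numerator_denominator egyptian_representation (egyptian_to_numerator_denominator egyptian_representation)

-- ===== LEMMAS AND PROOFS =====

-- B's two-variable Euclid computes the first component of A's extended gcd
theorem pv_gcd_loop_eq (a b : Int) : pv_gcd_loop b a = (pv_gcd_extended a b).1 := by
  fun_induction pv_gcd_extended a b with
  | case1 => rw [pv_gcd_loop]; simp_all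
  | case2 a b h r ih =>
    rw [pv_gcd_loop]
    simp only [h, dif_neg, not_false_iff]
    exact ih

theorem pv_step_eq (st : Int × Int) (d : Int) :
    pv_step st d = pv_simplify (st.2 + d * st.1) (d * st.2) := by
  simp [pv_step, pv_simplify, pv_gcd, pv_gcd_loop_eq]

theorem pv_ports_eq (l : List Int) :
    egyptian_to_numerator_denominator l = egyptian_to_numerator_denominator_alt l := by
  induction l with
  | nil => rfl
  | cons d rest ih =>
    simp only [egyptian_to_numerator_denominator, egyptian_to_numerator_denominator_alt,
      List.reverse_cons, List.foldl_append, List.foldl_cons, List.foldl_nil] at *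
    rw [← ih, pv_step_eq]

-- ===== VERDICT (by name: the statement is the Claim_ definition above) =====
theorem egyptian_to_numerator_denominator_spec : Claim_equal_egyptian_to_numerator_denominator := by
  intro l _ _
  unfold Spec_egyptian_to_numerator_denominator
  exact pv_ports_eq l
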